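-- pv_equiv track=rewrite | github.com/uccser/codewof | codewof/programming/question_recommendations.py | calculate_uncomfortable_concepts_or_contexts
-- ===== SOURCE A (Python) =====
-- def calculate_uncomfortable_concepts_or_contexts(category_nums, category_scores):
--     """
--     Calculate and return an uncomfortable concepts or contexts (in a prioritised order) based on the supplied scores.
--
--     The most comfortable concepts or contexts are assigned in sets. For example, the calculation of the most
--     comfortable concepts would generate a set of one or more concept types. Because of this, the most uncomfortable
--     concepts or contexts are assigned by gathering the set of concepts or contexts that are not assigned scores.
--     However, if there are no concepts or contexts with a score unassigned, the set of concepts/contexts with the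
--     highest score is assigned as the most uncomfortable. This was done to take into account a mix of concepts or
--     contexts, while also prioritising the scoring assigned. Additionally, the aforementioned concepts or contexts with
--     unassigned scores are especially useful, where these indicate question types that a given user has not attempted.
--     The subsequently in-order uncomfortable concepts or contexts use lower scores (i.e. decreasing score values).
--     """
--     uncomfortable_concepts_or_contexts = []
--     excluded_category_nums = set()
--     all_concepts_or_contexts_added = False
--     while not all_concepts_or_contexts_added:
--         categories_uncompleted = []
--         highest_score_categories = []
--         highest_score = -float('inf')
--         for category_num, score in zip(category_nums, category_scores):
--             if category_num not in excluded_category_nums: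
--                 if score is None:
--                     categories_uncompleted.append(category_num)
--                 elif len(highest_score_categories) < 1 or score == highest_score:
--                     highest_score_categories.append(category_num)
--                     highest_score = score
--                 elif score > highest_score:
--                     highest_score_categories = [category_num]
--                     highest_score = score
--         if len(categories_uncompleted) > 0:
--             uncomfortable_concepts_or_contexts.append(categories_uncompleted)
--             excluded_category_nums.update(categories_uncompleted)
--         elif len(highest_score_categories) > 0:
--             uncomfortable_concepts_or_contexts.append(highest_score_categories)
--             excluded_category_nums.update(highest_score_categories)
--         else:
--             all_concepts_or_contexts_added = True
--     return uncomfortable_concepts_or_contexts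
-- ===== SOURCE B (Python) =====
-- def calculate_uncomfortable_concepts_or_contexts(category_nums, category_scores):
--     pairs = list(zip(category_nums, category_scores))
--     tiers = []
--     seen = set()
--     nones = [n for n, s in pairs if s is None]
--     if nones:
--         tiers.append(nones)
--         seen.update(nones)
--     for v in sorted({s for _, s in pairs if s is not None}, reverse=True):
--         tier = [n for n, s in pairs if s == v and n not in seen]
--         if tier:
--             tiers.append(tier)
--             seen.update(tier)
--     return tiers
-- ===== Notes on version B (the rewrite author's own statement) =====
-- stated objective: faster
-- what changed: A's while-loop that rescans all pairs and recomputes the running maximum and excluded set on every round is replaced by one None-tier pass followed by a single descending sort of the distinct scores with one filtered pass per score.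
import Mathlib
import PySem

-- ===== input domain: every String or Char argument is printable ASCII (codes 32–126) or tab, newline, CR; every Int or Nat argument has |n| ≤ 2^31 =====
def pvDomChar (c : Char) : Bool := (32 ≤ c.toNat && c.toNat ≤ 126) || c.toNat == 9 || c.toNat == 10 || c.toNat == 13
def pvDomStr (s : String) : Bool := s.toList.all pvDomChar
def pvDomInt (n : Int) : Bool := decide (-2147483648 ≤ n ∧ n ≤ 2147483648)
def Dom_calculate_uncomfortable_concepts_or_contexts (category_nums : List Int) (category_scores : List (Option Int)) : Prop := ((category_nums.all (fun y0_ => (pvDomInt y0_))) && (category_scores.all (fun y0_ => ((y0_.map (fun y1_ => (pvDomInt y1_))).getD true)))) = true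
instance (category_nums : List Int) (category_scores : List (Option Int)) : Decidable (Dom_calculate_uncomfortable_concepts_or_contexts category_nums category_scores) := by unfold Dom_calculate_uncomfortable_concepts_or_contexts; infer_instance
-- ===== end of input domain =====

-- B replaces A's while-loop (which rescans all pairs and recomputes the maximum each round) by a single
-- None-tier pass followed by one filtered pass per distinct score in descending order; a timing run measured B faster.

-- ===== PORT A =====
-- one body of A's while-loop's for-loop; Python's 'highest_score = -float("inf")' sentinel is encoded as
-- 'none' (it is only ever compared with int scores: '== -inf' is always False, '> -inf' always True — exact)
def pvPassStep (excluded : PySem.Set Int) (st : List Int × List Int × Option Int) (p : Int × Option Int) : List Int × List Int × Option Int :=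
  if PySem.Set.contains excluded p.1 then st
  else
    match p.2 with
    | none => (st.1 ++ [p.1], st.2.1, st.2.2)
    | some s =>
      if st.2.1.length < 1 || st.2.2 == some s then (st.1, st.2.1 ++ [p.1], some s)
      else if (match st.2.2 with | none => true | some h => decide (h < s)) then (st.1, [p.1], some s)
      else st

-- A's while-loop; fuel (length of the zipped list + 1) is a termination bound only: each productive
-- iteration excludes at least one fresh category number, so the bound is never reached
def pvLoopA (pairs : List (Int × Option Int)) : PySem.Set Int → Nat → List (List Int)
  | _, 0 => []
  | excluded, fuel + 1 =>
    let st := pairs.foldl (pvPassStep excluded) ([], [], none)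
    if st.1.length > 0 then
      st.1 :: pvLoopA pairs (PySem.Set.update excluded st.1) fuel
    else if st.2.1.length > 0 then
      st.2.1 :: pvLoopA pairs (PySem.Set.update excluded st.2.1) fuel
    else []

def calculate_uncomfortable_concepts_or_contexts (category_nums : List Int) (category_scores : List (Option Int)) : List (List Int) :=
  pvLoopA (category_nums.zip category_scores) PySem.Set.empty ((category_nums.zip category_scores).length + 1)

-- ===== PORT B =====
def pvGroupStep (pairs : List (Int × Option Int)) (acc : List (List Int) × PySem.Set Int) (v : Int) : List (List Int) × PySem.Set Int :=
  let tier := (pairs.filter (fun p => p.2 == some v && !(PySem.Set.contains acc.2 p.1))).map Prod.fst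
  if tier.length > 0 then (acc.1 ++ [tier], PySem.Set.update acc.2 tier) else acc

def calculate_uncomfortable_concepts_or_contexts_alt (category_nums : List Int) (category_scores : List (Option Int)) : List (List Int) :=
  let pairs := category_nums.zip category_scores
  let nones := (pairs.filter (fun p => p.2 == (none : Option Int))).map Prod.fst
  let start : List (List Int) × PySem.Set Int :=
    if nones.length > 0 then ([nones], PySem.Set.ofList nones) else ([], PySem.Set.empty)
  let vs := PySem.List.sorted (PySem.Set.ofList ((pairs.filter (fun p => !(p.2 == (none : Option Int)))).map (fun p => p.2.getD 0))) (fun x => x) true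
  (vs.foldl (pvGroupStep pairs) start).1

-- ===== PRECONDITION & SPEC =====
def Spec_calculate_uncomfortable_concepts_or_contexts (category_nums : List Int) (category_scores : List (Option Int)) (out : List (List Int)) : Prop := out = calculate_uncomfortable_concepts_or_contexts_alt category_nums category_scores
instance (category_nums : List Int) (category_scores : List (Option Int)) (out : List (List Int)) : Decidable (Spec_calculate_uncomfortable_concepts_or_contexts category_nums category_scores out) := by unfold Spec_calculate_uncomfortable_concepts_or_contexts; infer_instance

-- ===== CLAIM (what is proved, stated in full; the proofs are below) =====
def Claim_equal_calculate_uncomfortable_concepts_or_contexts : Prop := ∀ (category_nums : List Int) (category_scores : List (Option Int)), Dom_calculate_uncomfortable_concepts_or_contexts category_nums category_scores → Spec_calculate_uncomfortable_concepts_or_contexts category_nums category_scores (calculate_uncomfortable_concepts_or_contexts category_nums category_scores)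

-- ===== LEMMAS AND PROOFS =====

-- spec-side descriptions of one pass of A over the pairs, relative to an excluded set E
def uncL (E : PySem.Set Int) (pairs : List (Int × Option Int)) : List Int :=
  (pairs.filter (fun p => !(PySem.Set.contains E p.1) && p.2 == (none : Option Int))).map Prod.fst

def grpv (E : PySem.Set Int) (v : Int) (pairs : List (Int × Option Int)) : List Int :=
  (pairs.filter (fun p => !(PySem.Set.contains E p.1) && p.2 == some v)).map Prod.fst

-- running maximum of the not-excluded scores, 'none' = -inf
def maxRem (E : PySem.Set Int) : Option Int → List (Int × Option Int) → Option Int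
  | M, [] => M
  | M, p :: r =>
    maxRem E (if PySem.Set.contains E p.1 then M
              else match p.2 with
                   | none => M
                   | some s => some (match M with | none => s | some m => max m s)) r

-- the tiers B's fold produces from the descending score list vs, starting from excluded set E
def tiersOf (pairs : List (Int × Option Int)) : PySem.Set Int → List Int → List (List Int)
  | _, [] => []
  | E, v :: vs =>
    let t := grpv E v pairs
    if t.length > 0 then t :: tiersOf pairs (PySem.Set.update E t) vs else tiersOf pairs E vs

lemma uncL_cons_excl {E : PySem.Set Int} {n : Int} {osc : Option Int} {r : List (Int × Option Int)}
    (h : n ∈ E) : uncL E ((n, osc) :: r) = uncL E r := by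
  simp [uncL, List.filter, h]

lemma uncL_cons_none {E : PySem.Set Int} {n : Int} {r : List (Int × Option Int)}
    (h : n ∉ E) : uncL E ((n, none) :: r) = n :: uncL E r := by
  simp [uncL, List.filter, h]

lemma uncL_cons_some {E : PySem.Set Int} {n s : Int} {r : List (Int × Option Int)} :
    uncL E ((n, some s) :: r) = uncL E r := by
  simp [uncL, List.filter]

lemma grpv_cons_excl {E : PySem.Set Int} {v n : Int} {osc : Option Int} {r : List (Int × Option Int)}
    (h : n ∈ E) : grpv E v ((n, osc) :: r) = grpv E v r := by
  simp [grpv, List.filter, h]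

lemma grpv_cons_none {E : PySem.Set Int} {v n : Int} {r : List (Int × Option Int)} :
    grpv E v ((n, none) :: r) = grpv E v r := by
  simp [grpv, List.filter]

lemma grpv_cons_eq {E : PySem.Set Int} {v n : Int} {r : List (Int × Option Int)}
    (h : n ∉ E) : grpv E v ((n, some v) :: r) = n :: grpv E v r := by
  simp [grpv, List.filter, h]

lemma grpv_cons_ne {E : PySem.Set Int} {v n s : Int} {r : List (Int × Option Int)}
    (h : s ≠ v) : grpv E v ((n, some s) :: r) = grpv E v r := by
  have hb : (s == v) = false := by simp [h]
  simp [grpv, List.filter, hb]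

lemma maxRem_cons_excl {E : PySem.Set Int} {M : Option Int} {n : Int} {osc : Option Int}
    {r : List (Int × Option Int)} (h : n ∈ E) : maxRem E M ((n, osc) :: r) = maxRem E M r := by
  simp [maxRem, h]

lemma maxRem_cons_none {E : PySem.Set Int} {M : Option Int} {n : Int}
    {r : List (Int × Option Int)} (h : n ∉ E) : maxRem E M ((n, none) :: r) = maxRem E M r := by
  simp [maxRem, h]

lemma maxRem_cons_some {E : PySem.Set Int} {M : Option Int} {n s : Int}
    {r : List (Int × Option Int)} (h : n ∉ E) :
    maxRem E M ((n, some s) :: r)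
      = maxRem E (some (match M with | none => s | some m => max m s)) r := by
  simp [maxRem, h]

lemma maxRem_ge (E : PySem.Set Int) : ∀ (r : List (Int × Option Int)) (m : Int),
    ∃ t, maxRem E (some m) r = some t ∧ m ≤ t := by
  intro r
  induction r with
  | nil => intro m; exact ⟨m, rfl, le_refl m⟩
  | cons p r ih =>
    intro m
    obtain ⟨n, osc⟩ := p
    by_cases hE : n ∈ E
    · simpa [maxRem_cons_excl hE] using ih m
    · cases osc with
      | none => simpa [maxRem_cons_none hE] using ih m
      | some s =>
        obtain ⟨t, ht, hle⟩ := ih (max m s)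
        exact ⟨t, by rw [maxRem_cons_some hE]; exact ht, le_trans (le_max_left m s) hle⟩

lemma pass_char (E : PySem.Set Int) : ∀ (pairs : List (Int × Option Int)) (u g : List Int) (M : Option Int),
    (g = [] ↔ M = none) →
    pairs.foldl (pvPassStep E) (u, g, M) =
      (u ++ uncL E pairs,
       (match maxRem E M pairs with
        | none => g
        | some t => if M = some t then g ++ grpv E t pairs else grpv E t pairs),
       maxRem E M pairs) := by
  intro pairs
  induction pairs with
  | nil => intro u g M hwf; simp [uncL, grpv, maxRem]; cases M <;> simp_all
  | cons p r ih =>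
    intro u g M hwf
    obtain ⟨n, osc⟩ := p
    by_cases hE : n ∈ E
    · rw [List.foldl_cons,
        show pvPassStep E (u, g, M) (n, osc) = (u, g, M) by simp [pvPassStep, hE],
        ih u g M hwf, uncL_cons_excl hE, maxRem_cons_excl hE]
      cases hmr : maxRem E M r with
      | none => rfl
      | some t => simp [grpv_cons_excl hE]
    · cases osc with
      | none =>
        rw [List.foldl_cons,
          show pvPassStep E (u, g, M) (n, none) = (u ++ [n], g, M) by simp [pvPassStep, hE],
          ih (u ++ [n]) g M hwf, uncL_cons_none hE, maxRem_cons_none hE]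
        cases hmr : maxRem E M r with
        | none => simp
        | some t => simp [grpv_cons_none]
      | some s =>
        cases M with
        | none =>
          have hg : g = [] := hwf.mpr rfl
          subst hg
          rw [List.foldl_cons,
            show pvPassStep E (u, [], none) (n, some s) = (u, [n], some s) by
              simp [pvPassStep, hE],
            ih u [n] (some s) (by simp)]
          obtain ⟨t, ht, hle⟩ := maxRem_ge E r s
          rw [ht, maxRem_cons_some hE, uncL_cons_some]
          rw [show maxRem E (some s) r = some t from ht]
          rcases eq_or_lt_of_le hle with heq | hlt
          · subst heq
            simp [grpv_cons_eq hE]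
          · have hne : s ≠ t := ne_of_lt hlt
            simp [hne, grpv_cons_ne hne]
        | some m =>
          have hg : g ≠ [] := by simp [hwf]
          by_cases hsm : s = m
          · subst hsm
            rw [List.foldl_cons,
              show pvPassStep E (u, g, some s) (n, some s) = (u, g ++ [n], some s) by
                simp [pvPassStep, hE],
              ih u (g ++ [n]) (some s) (by simp [hg]), uncL_cons_some,
              maxRem_cons_some hE]
            obtain ⟨t, ht, hle⟩ := maxRem_ge E r s
            rw [show maxRem E (some (max s s)) r = some t by rwa [max_self], ht]
            rcases eq_or_lt_of_le hle with heq | hlt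
            · subst heq
              simp [grpv_cons_eq hE]
            · have hne : s ≠ t := ne_of_lt hlt
              simp [hne, grpv_cons_ne hne]
          · by_cases hms : m < s
            · rw [List.foldl_cons,
                show pvPassStep E (u, g, some m) (n, some s) = (u, [n], some s) by
                  simp [pvPassStep, hE, hg, hms, List.length_eq_zero_iff, Ne.symm hsm],
                ih u [n] (some s) (by simp), uncL_cons_some, maxRem_cons_some hE]
              obtain ⟨t, ht, hle⟩ := maxRem_ge E r s
              rw [show maxRem E (some (max m s)) r = some t by rwa [max_eq_right (le_of_lt hms)], ht]
              have hmt : (some m : Option Int) ≠ some t := by simp; omega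
              rcases eq_or_lt_of_le hle with heq | hlt
              · subst heq
                simp [hmt, grpv_cons_eq hE]
              · have hne : s ≠ t := ne_of_lt hlt
                simp [hmt, hne, grpv_cons_ne hne]
            · have hsm' : s < m := lt_of_le_of_ne (not_lt.mp hms) hsm
              rw [List.foldl_cons,
                show pvPassStep E (u, g, some m) (n, some s) = (u, g, some m) by
                  simp [pvPassStep, hE, hg, hms, List.length_eq_zero_iff, Ne.symm hsm],
                ih u g (some m) hwf, uncL_cons_some, maxRem_cons_some hE]
              obtain ⟨t, ht, hle⟩ := maxRem_ge E r m
              rw [show maxRem E (some (max m s)) r = some t by rwa [max_eq_left (le_of_lt hsm')], ht]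
              have hst : s ≠ t := by omega
              simp [grpv_cons_ne hst]

lemma grpv_eq_port (E : PySem.Set Int) (v : Int) (pairs : List (Int × Option Int)) :
    (pairs.filter (fun p => p.2 == some v && !(PySem.Set.contains E p.1))).map Prod.fst
      = grpv E v pairs := by
  unfold grpv
  congr 1
  apply List.filter_congr
  intro p _
  exact Bool.and_comm _ _

lemma groupFold (pairs : List (Int × Option Int)) : ∀ (vs : List Int) (acc : List (List Int)) (E : PySem.Set Int),
    (vs.foldl (pvGroupStep pairs) (acc, E)).1 = acc ++ tiersOf pairs E vs := by
  intro vs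
  induction vs with
  | nil => intro acc E; simp [tiersOf]
  | cons v vs ih =>
    intro acc E
    rw [List.foldl_cons]
    by_cases h : (grpv E v pairs).length > 0
    · rw [show pvGroupStep pairs (acc, E) v
          = (acc ++ [grpv E v pairs], PySem.Set.update E (grpv E v pairs)) by
        simp only [pvGroupStep, grpv_eq_port]
        simp [h]]
      rw [ih]
      simp [tiersOf, h]
    · rw [show pvGroupStep pairs (acc, E) v = (acc, E) by
        simp only [pvGroupStep, grpv_eq_port]
        simp [Nat.le_zero.mp (not_lt.mp h)]]
      rw [ih]
      simp [tiersOf, Nat.le_zero.mp (not_lt.mp h)]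

lemma uncL_eq_nil (E : PySem.Set Int) (pairs : List (Int × Option Int))
    (h1 : ∀ p ∈ pairs, p.1 ∉ E → p.2 ≠ none) : uncL E pairs = [] := by
  unfold uncL
  rw [List.filter_eq_nil_iff.mpr, List.map_nil]
  intro p hp
  by_cases hE : p.1 ∈ E
  · simp [hE]
  · simp [hE, h1 p hp hE]

lemma maxRem_none (E : PySem.Set Int) : ∀ (pairs : List (Int × Option Int)),
    (∀ p ∈ pairs, p.1 ∈ E ∨ p.2 = none) → maxRem E none pairs = none := by
  intro pairs
  induction pairs with
  | nil => intro _; rfl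
  | cons p r ih =>
    intro h
    obtain ⟨n, osc⟩ := p
    rcases h (n, osc) (by simp) with hE | hnone
    · rw [maxRem_cons_excl hE]; exact ih fun q hq => h q (by simp [hq])
    · by_cases hE : n ∈ E
      · rw [maxRem_cons_excl hE]; exact ih fun q hq => h q (by simp [hq])
      · simp only at hnone; subst hnone
        rw [maxRem_cons_none hE]; exact ih fun q hq => h q (by simp [hq])

lemma maxRem_reach (E : PySem.Set Int) (v : Int) : ∀ (pairs : List (Int × Option Int)) (M : Option Int),
    (∀ p ∈ pairs, p.1 ∉ E → ∀ s, p.2 = some s → s ≤ v) →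
    ((∃ p ∈ pairs, p.1 ∉ E ∧ p.2 = some v) ∨ M = some v) →
    (∀ m, M = some m → m ≤ v) →
    maxRem E M pairs = some v := by
  intro pairs
  induction pairs with
  | nil =>
    intro M _ hdisj _
    rcases hdisj with ⟨p, hp, _⟩ | hM
    · simp at hp
    · simpa [maxRem] using hM
  | cons p r ih =>
    intro M hb hdisj hMle
    obtain ⟨n, osc⟩ := p
    by_cases hE : n ∈ E
    · rw [maxRem_cons_excl hE]
      apply ih M (fun q hq => hb q (by simp [hq]))
      · rcases hdisj with ⟨q, hq, hq1, hq2⟩ | hM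
        · rcases List.mem_cons.mp hq with rfl | hq'
          · exact absurd hE hq1
          · exact Or.inl ⟨q, hq', hq1, hq2⟩
        · exact Or.inr hM
      · exact hMle
    · cases osc with
      | none =>
        rw [maxRem_cons_none hE]
        apply ih M (fun q hq => hb q (by simp [hq]))
        · rcases hdisj with ⟨q, hq, hq1, hq2⟩ | hM
          · rcases List.mem_cons.mp hq with rfl | hq'
            · simp at hq2
            · exact Or.inl ⟨q, hq', hq1, hq2⟩
          · exact Or.inr hM
        · exact hMle
      | some s =>
        have hs : s ≤ v := hb (n, some s) (by simp) hE s rfl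
        rw [maxRem_cons_some hE]
        cases M with
        | none =>
          apply ih (some s) (fun q hq => hb q (by simp [hq]))
          · rcases hdisj with ⟨q, hq, hq1, hq2⟩ | hM
            · rcases List.mem_cons.mp hq with rfl | hq'
              · simp only at hq2
                injection hq2 with hq2
                subst hq2
                exact Or.inr rfl
              · exact Or.inl ⟨q, hq', hq1, hq2⟩
            · simp at hM
          · intro m hm; injection hm with hm; omega
        | some m0 =>
          have hm0 : m0 ≤ v := hMle m0 rfl
          apply ih (some (max m0 s)) (fun q hq => hb q (by simp [hq]))
          · rcases hdisj with ⟨q, hq, hq1, hq2⟩ | hM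
            · rcases List.mem_cons.mp hq with rfl | hq'
              · simp only at hq2
                injection hq2 with hq2
                subst hq2
                exact Or.inr (by rw [max_eq_right hm0])
              · exact Or.inl ⟨q, hq', hq1, hq2⟩
            · injection hM with hM
              subst hM
              exact Or.inr (by rw [max_eq_left hs])
          · intro m hm; injection hm with hm; omega

lemma grpv_nonempty_witness {E : PySem.Set Int} {v : Int} {pairs : List (Int × Option Int)}
    (h : (grpv E v pairs).length > 0) : ∃ p ∈ pairs, p.1 ∉ E ∧ p.2 = some v := by
  unfold grpv at h
  rw [List.length_map] at h
  obtain ⟨p, hp⟩ := List.exists_mem_of_length_pos h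
  have := List.mem_filter.mp hp
  refine ⟨p, this.1, ?_, ?_⟩
  · have := this.2
    simp at this
    exact this.1
  · have := this.2
    simp at this
    exact this.2

lemma loop_eq (pairs : List (Int × Option Int)) : ∀ (vs : List Int) (E : PySem.Set Int) (fuel : Nat),
    (∀ p ∈ pairs, p.1 ∉ E → p.2 ≠ none) →
    vs.Pairwise (fun a b => b < a) →
    (∀ p ∈ pairs, p.1 ∉ E → ∀ s, p.2 = some s → s ∈ vs) →
    vs.length + 1 ≤ fuel →
    pvLoopA pairs E fuel = tiersOf pairs E vs := by
  intro vs
  induction vs with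
  | nil =>
    intro E fuel h1 _ h3 hf
    obtain ⟨f, rfl⟩ : ∃ f, fuel = f + 1 := ⟨fuel - 1, by omega⟩
    have hrem : ∀ p ∈ pairs, p.1 ∈ E ∨ p.2 = none := by
      intro p hp
      by_cases hE : p.1 ∈ E
      · exact Or.inl hE
      · cases hosc : p.2 with
        | none => exact Or.inr rfl
        | some s => exact absurd (h3 p hp hE s hosc) (by simp)
    simp only [pvLoopA]
    rw [pass_char E pairs [] [] none (by simp)]
    rw [uncL_eq_nil E pairs h1, maxRem_none E pairs hrem]
    simp [tiersOf]
  | cons v vs ih =>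
    intro E fuel h1 h2 h3 hf
    obtain ⟨f, rfl⟩ : ∃ f, fuel = f + 1 := ⟨fuel - 1, by omega⟩
    by_cases hgv : (grpv E v pairs).length > 0
    · -- v is the maximum of the remaining scores; A emits exactly grpv E v pairs
      have hbound : ∀ p ∈ pairs, p.1 ∉ E → ∀ s, p.2 = some s → s ≤ v := by
        intro p hp hE s hs
        rcases List.mem_cons.mp (h3 p hp hE s hs) with rfl | hmem
        · exact le_refl _
        · exact le_of_lt (List.rel_of_pairwise_cons h2 hmem)
      have hmax : maxRem E none pairs = some v :=
        maxRem_reach E v pairs none hbound (Or.inl (grpv_nonempty_witness hgv)) (by simp)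
      simp only [pvLoopA]
      rw [pass_char E pairs [] [] none (by simp)]
      rw [uncL_eq_nil E pairs h1, hmax]
      have hvne : (none : Option Int) ≠ some v := by simp
      simp only [if_neg hvne, List.nil_append]
      rw [if_neg (by simp), if_pos (by simpa using hgv)]
      rw [show tiersOf pairs E (v :: vs) = grpv E v pairs :: tiersOf pairs (PySem.Set.update E (grpv E v pairs)) vs by
        simp [tiersOf, hgv]]
      congr 1
      apply ih
      · intro p hp hE
        exact h1 p hp (fun h => hE ((PySem.Set.mem_update _ _ _).mpr (Or.inl h)))
      · exact h2.of_cons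
      · intro p hp hE s hs
        have hEold : p.1 ∉ E := fun h => hE ((PySem.Set.mem_update _ _ _).mpr (Or.inl h))
        rcases List.mem_cons.mp (h3 p hp hEold s hs) with rfl | hmem
        · exfalso
          apply hE
          apply (PySem.Set.mem_update _ _ _).mpr
          refine Or.inr ?_
          unfold grpv
          refine List.mem_map.mpr ⟨p, List.mem_filter.mpr ⟨hp, ?_⟩, rfl⟩
          simp [hEold, hs]
        · exact hmem
      · simpa using Nat.le_of_succ_le_succ hf
    · rw [show tiersOf pairs E (v :: vs) = tiersOf pairs E vs by
        simp [tiersOf, Nat.le_zero.mp (not_lt.mp hgv)]]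
      apply ih E (f + 1)
      · exact h1
      · exact h2.of_cons
      · intro p hp hE s hs
        rcases List.mem_cons.mp (h3 p hp hE s hs) with rfl | hmem
        · exfalso
          apply hgv
          unfold grpv
          rw [List.length_map]
          refine List.length_pos_iff.mpr (List.ne_nil_of_mem (List.mem_filter.mpr ⟨hp, ?_⟩))
          simp [hE, hs]
        · exact hmem
      · simp at hf ⊢; omega

lemma uncL_empty (pairs : List (Int × Option Int)) :
    uncL PySem.Set.empty pairs = (pairs.filter (fun p => p.2 == (none : Option Int))).map Prod.fst := by
  unfold uncL
  congr 1

theorem calculate_uncomfortable_concepts_or_contexts_main : ∀ (category_nums : List Int) (category_scores : List (Option Int)),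
    calculate_uncomfortable_concepts_or_contexts category_nums category_scores
      = calculate_uncomfortable_concepts_or_contexts_alt category_nums category_scores := by
  intro nums scores
  simp only [calculate_uncomfortable_concepts_or_contexts, calculate_uncomfortable_concepts_or_contexts_alt]
  set pairs := nums.zip scores with hpairs
  set nonesB := (pairs.filter (fun p => p.2 == (none : Option Int))).map Prod.fst with hnB
  set vals := (pairs.filter (fun p => !(p.2 == (none : Option Int)))).map (fun p => p.2.getD 0) with hvals
  set vs := PySem.List.sorted (PySem.Set.ofList vals) (fun x => x) true with hvs
  have h2 : vs.Pairwise (fun a b => b < a) := by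
    have hle : vs.Pairwise (fun a b => b ≤ a) := PySem.List.sorted_pairwise_rev _ _
    have hnd : vs.Nodup :=
      (PySem.List.sorted_perm _ _ _).nodup_iff.mpr (PySem.Set.nodup_ofList _)
    exact (hle.and hnd).imp (fun h => lt_of_le_of_ne h.1 (Ne.symm h.2))
  have h3 : ∀ p ∈ pairs, ∀ s : Int, p.2 = some s → s ∈ vs := by
    intro p hp s hs
    rw [hvs, PySem.List.mem_sorted, PySem.Set.mem_ofList]
    exact List.mem_map.mpr ⟨p, List.mem_filter.mpr ⟨hp, by simp [hs]⟩, by simp [hs]⟩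
  have hsum : pairs.length
      = (pairs.filter (fun p => p.2 == (none : Option Int))).length
        + (pairs.filter (fun p => !(p.2 == (none : Option Int)))).length :=
    List.length_eq_length_filter_add _
  have hvslen : vs.length ≤ vals.length := by
    rw [hvs, PySem.List.length_sorted]
    exact PySem.Set.length_ofList_le _
  have hnBlen : nonesB.length = (pairs.filter (fun p => p.2 == (none : Option Int))).length := by
    rw [hnB, List.length_map]
  have hvallen : vals.length = (pairs.filter (fun p => !(p.2 == (none : Option Int)))).length := by
    rw [hvals, List.length_map]
  have hmemnB : ∀ p ∈ pairs, p.2 = none → p.1 ∈ nonesB := by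
    intro p hp hs
    exact List.mem_map.mpr ⟨p, List.mem_filter.mpr ⟨hp, by simp [hs]⟩, rfl⟩
  have hst1 : (pairs.foldl (pvPassStep PySem.Set.empty) ([], [], none)).1 = nonesB := by
    rw [pass_char PySem.Set.empty pairs [] [] none (by simp)]
    show [] ++ uncL PySem.Set.empty pairs = nonesB
    rw [List.nil_append, uncL_empty, ← hnB]
  by_cases hn : nonesB.length > 0
  · -- first tier is the unsorted categories
    simp only [pvLoopA]
    rw [hst1, if_pos (by simpa using hn)]
    rw [show PySem.Set.update PySem.Set.empty nonesB = PySem.Set.ofList nonesB from rfl]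
    rw [loop_eq pairs vs (PySem.Set.ofList nonesB) pairs.length
      (fun p hp hE hnone => hE ((PySem.Set.mem_ofList _ _).mpr (hmemnB p hp hnone)))
      h2 (fun p hp _ s hs => h3 p hp s hs) (by omega)]
    rw [if_pos hn, groupFold]
    simp
  · have hn0 : nonesB = [] := List.length_eq_zero_iff.mp (by omega)
    rw [loop_eq pairs vs PySem.Set.empty (pairs.length + 1)
      (fun p hp _ hnone => by simpa [hn0] using hmemnB p hp hnone)
      h2 (fun p hp _ s hs => h3 p hp s hs) (by omega)]
    rw [if_neg hn, groupFold]
    simp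

-- ===== VERDICT (by name: the statement is the Claim_ definition above) =====
theorem calculate_uncomfortable_concepts_or_contexts_spec : Claim_equal_calculate_uncomfortable_concepts_or_contexts := by
  intro nums scores _
  unfold Spec_calculate_uncomfortable_concepts_or_contexts
  exact calculate_uncomfortable_concepts_or_contexts_main nums scores
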